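-- pv_equiv track=rewrite | github.com/lscitl/algorithm_study | programmers/옹알이.py | wordcomp
-- ===== SOURCE A (Python) =====
-- def wordcomp(tmp):
--     idx = 0
--     while idx < len(tmp):
--         if tmp[idx] == 'a':
--             if tmp[idx:idx + 3] == "aya":
--                 idx += 3
--                 continue
--         elif tmp[idx] == 'y':
--             if tmp[idx:idx + 2] == "ye":
--                 idx += 2
--                 continue
--         elif tmp[idx] == 'w':
--             if tmp[idx:idx + 3] == "woo":
--                 idx += 3
--                 continue
--         elif tmp[idx] == 'm':
--             if tmp[idx:idx + 2] == "ma":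
--                 idx += 2
--                 continue
--         return 0
--     return 1
-- ===== SOURCE B (Python) =====
-- import re
--
-- _BABBLE = re.compile(r'(?:aya|ye|woo|ma)*')
--
-- def wordcomp(tmp):
--     return 1 if _BABBLE.fullmatch(tmp) else 0
-- ===== Notes on version B (the rewrite author's own statement) =====
-- stated objective: idiomatic
-- what changed: Replaces the hand-written index/while loop with character dispatch and slice comparisons by a single precompiled regex fullmatch of the starred token alternation (?:aya|ye|woo|ma)*; the greedy parse is unambiguous since the tokens start with distinct characters.
import Mathlib
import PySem

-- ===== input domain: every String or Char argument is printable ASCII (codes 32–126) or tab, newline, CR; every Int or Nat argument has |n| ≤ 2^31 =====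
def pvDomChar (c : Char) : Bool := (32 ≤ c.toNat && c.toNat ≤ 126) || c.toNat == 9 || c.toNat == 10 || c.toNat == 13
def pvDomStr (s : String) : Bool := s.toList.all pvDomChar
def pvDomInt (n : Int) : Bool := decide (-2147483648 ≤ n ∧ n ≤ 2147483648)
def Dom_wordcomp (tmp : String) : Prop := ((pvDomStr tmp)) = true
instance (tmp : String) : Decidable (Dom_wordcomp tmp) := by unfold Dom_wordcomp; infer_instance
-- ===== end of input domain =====

-- B replaces A's index/while loop by a regex fullmatch of (?:aya|ye|woo|ma)* (idiomatic, same cost).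

-- ===== PORT A =====
-- A's while loop over an int index; tmp[idx] with 0 ≤ idx < len is cs[idx],
-- and the slice tmp[idx:idx+k] with 0 ≤ idx is exactly (cs.drop idx).take k.
def wordcompGo (cs : List Char) (idx : Nat) : Int :=
  if h : idx < cs.length then
    if cs[idx] = 'a' then
      if (cs.drop idx).take 3 = ['a', 'y', 'a'] then wordcompGo cs (idx + 3) else 0
    else if cs[idx] = 'y' then
      if (cs.drop idx).take 2 = ['y', 'e'] then wordcompGo cs (idx + 2) else 0
    else if cs[idx] = 'w' then
      if (cs.drop idx).take 3 = ['w', 'o', 'o'] then wordcompGo cs (idx + 3) else 0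
    else if cs[idx] = 'm' then
      if (cs.drop idx).take 2 = ['m', 'a'] then wordcompGo cs (idx + 2) else 0
    else 0
  else 1
termination_by cs.length - idx
decreasing_by all_goals omega

def wordcomp (tmp : String) : Int := wordcompGo tmp.toList 0

-- ===== PORT B =====
-- The regex engine's deterministic run of fullmatch against (?:aya|ye|woo|ma)*:
-- at each position try the alternatives in order by prefix match (no backtracking
-- arises: the four tokens begin with distinct characters).
def matchTokens : List Char → Bool
  | [] => true
  | c :: r =>
    if ['a', 'y', 'a'].isPrefixOf (c :: r) then matchTokens ((c :: r).drop 3)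
    else if ['y', 'e'].isPrefixOf (c :: r) then matchTokens ((c :: r).drop 2)
    else if ['w', 'o', 'o'].isPrefixOf (c :: r) then matchTokens ((c :: r).drop 3)
    else if ['m', 'a'].isPrefixOf (c :: r) then matchTokens ((c :: r).drop 2)
    else false
termination_by l => l.length
decreasing_by all_goals simp

def wordcomp_alt (tmp : String) : Int := if matchTokens tmp.toList then 1 else 0

-- ===== PRECONDITION & SPEC =====
def Spec_wordcomp (tmp : String) (out : Int) : Prop := out = wordcomp_alt tmp
instance (tmp : String) (out : Int) : Decidable (Spec_wordcomp tmp out) := by unfold Spec_wordcomp; infer_instance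

-- ===== CLAIM (what is proved, stated in full; the proofs are below) =====
def Claim_equal_wordcomp : Prop := ∀ (tmp : String), Dom_wordcomp tmp → Spec_wordcomp tmp (wordcomp tmp)

-- ===== LEMMAS AND PROOFS =====

theorem take_eq_of_isPrefixOf {l t : List Char} (h : t.isPrefixOf l = true) :
    l.take t.length = t :=
  (List.prefix_iff_eq_take.mp (List.isPrefixOf_iff_prefix.mp h)).symm

theorem go_eq (cs : List Char) (idx : Nat) :
    wordcompGo cs idx = if matchTokens (cs.drop idx) then 1 else 0 := by
  induction idx using wordcompGo.induct cs with
  | case1 x h hA ht ih =>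
    rw [wordcompGo]
    simp only [dif_pos h, if_pos hA, if_pos ht, ih]
    have hd : cs.drop x = 'a' :: 'y' :: 'a' :: cs.drop (x + 3) := by
      conv_lhs => rw [← List.take_append_drop 3 (cs.drop x)]
      rw [ht, List.drop_drop]
      rfl
    rw [hd]
    simp [matchTokens, List.isPrefixOf]
  | case2 x h hA hn =>
    rw [wordcompGo]
    rw [List.drop_eq_getElem_cons h, hA] at hn ⊢
    simp only [dif_pos h, if_pos hA, if_neg hn]
    cases hp : ['a', 'y', 'a'].isPrefixOf ('a' :: cs.drop (x + 1)) with
    | true => exact absurd (by simpa using take_eq_of_isPrefixOf hp) hn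
    | false => rw [matchTokens]; simp only [hp]; simp [List.isPrefixOf]
  | case3 x h hA hY ht ih =>
    rw [wordcompGo]
    simp only [dif_pos h, if_neg hA, if_pos hY, if_pos ht, ih]
    have hd : cs.drop x = 'y' :: 'e' :: cs.drop (x + 2) := by
      conv_lhs => rw [← List.take_append_drop 2 (cs.drop x)]
      rw [ht, List.drop_drop]
      rfl
    rw [hd]
    simp [matchTokens, List.isPrefixOf]
  | case4 x h hA hY hn =>
    rw [wordcompGo]
    rw [List.drop_eq_getElem_cons h, hY] at hn ⊢
    simp only [dif_pos h, if_neg hA, if_pos hY, if_neg hn]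
    cases hp : ['y', 'e'].isPrefixOf ('y' :: cs.drop (x + 1)) with
    | true => exact absurd (by simpa using take_eq_of_isPrefixOf hp) hn
    | false => rw [matchTokens]; simp only [hp]; simp [List.isPrefixOf]
  | case5 x h hA hY hW ht ih =>
    rw [wordcompGo]
    simp only [dif_pos h, if_neg hA, if_neg hY, if_pos hW, if_pos ht, ih]
    have hd : cs.drop x = 'w' :: 'o' :: 'o' :: cs.drop (x + 3) := by
      conv_lhs => rw [← List.take_append_drop 3 (cs.drop x)]
      rw [ht, List.drop_drop]
      rfl
    rw [hd]
    simp [matchTokens, List.isPrefixOf]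
  | case6 x h hA hY hW hn =>
    rw [wordcompGo]
    rw [List.drop_eq_getElem_cons h, hW] at hn ⊢
    simp only [dif_pos h, if_neg hA, if_neg hY, if_pos hW, if_neg hn]
    cases hp : ['w', 'o', 'o'].isPrefixOf ('w' :: cs.drop (x + 1)) with
    | true => exact absurd (by simpa using take_eq_of_isPrefixOf hp) hn
    | false => rw [matchTokens]; simp only [hp]; simp [List.isPrefixOf]
  | case7 x h hA hY hW hM ht ih =>
    rw [wordcompGo]
    simp only [dif_pos h, if_neg hA, if_neg hY, if_neg hW, if_pos hM, if_pos ht, ih]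
    have hd : cs.drop x = 'm' :: 'a' :: cs.drop (x + 2) := by
      conv_lhs => rw [← List.take_append_drop 2 (cs.drop x)]
      rw [ht, List.drop_drop]
      rfl
    rw [hd]
    simp [matchTokens, List.isPrefixOf]
  | case8 x h hA hY hW hM hn =>
    rw [wordcompGo]
    rw [List.drop_eq_getElem_cons h, hM] at hn ⊢
    simp only [dif_pos h, if_neg hA, if_neg hY, if_neg hW, if_pos hM, if_neg hn]
    cases hp : ['m', 'a'].isPrefixOf ('m' :: cs.drop (x + 1)) with
    | true => exact absurd (by simpa using take_eq_of_isPrefixOf hp) hn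
    | false => rw [matchTokens]; simp only [hp]; simp [List.isPrefixOf]
  | case9 x h hA hY hW hM =>
    rw [wordcompGo]
    simp only [dif_pos h, if_neg hA, if_neg hY, if_neg hW, if_neg hM]
    rw [List.drop_eq_getElem_cons h, matchTokens]
    simp [List.isPrefixOf, Ne.symm hA, Ne.symm hY, Ne.symm hW, Ne.symm hM]
  | case10 x h =>
    rw [wordcompGo]
    rw [List.drop_eq_nil_of_le (by omega)]
    simp [h, matchTokens]

theorem wordcomp_spec : Claim_equal_wordcomp := by
  intro tmp _
  unfold Spec_wordcomp wordcomp wordcomp_alt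
  simpa using go_eq tmp.toList 0
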